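-- pv_equiv track=rewrite | github.com/TedYav/CodingChallenges | HackerRank/Algorithms/dp/brick_stack.py | calculate_rows
-- ===== SOURCE A (Python) =====
-- def calculate_rows(width, modulus):
-- 	row_memo = [0 for i in range(width+1)]
-- 	row_memo[0] = 1
-- 	for i in range(1, width + 1):
-- 		for j in range(1,5):
-- 			if i-j >= 0:
-- 				row_memo[i] += row_memo[i-j]
-- 		row_memo[i] %= modulus
-- 	return row_memo
-- ===== SOURCE B (Python) =====
-- def calculate_rows(width, modulus):
-- 	# Sliding-window accumulator: one running sum replaces the inner 4-term re-summing loop.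
-- 	row_memo = [0] * (width + 1)
-- 	row_memo[0] = 1
-- 	window = 1
-- 	for i in range(1, width + 1):
-- 		row_memo[i] = window % modulus
-- 		window += row_memo[i]
-- 		if i - 4 >= 0:
-- 			window -= row_memo[i - 4]
-- 	return row_memo
-- ===== Notes on version B (the rewrite author's own statement) =====
-- stated objective: faster
-- what changed: Replaces the inner 4-term re-summing loop over row_memo[i-1..i-4] by a single sliding-window accumulator maintained incrementally (add the new entry, subtract the entry leaving the window), filling the same preallocated array.
import Mathlib
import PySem

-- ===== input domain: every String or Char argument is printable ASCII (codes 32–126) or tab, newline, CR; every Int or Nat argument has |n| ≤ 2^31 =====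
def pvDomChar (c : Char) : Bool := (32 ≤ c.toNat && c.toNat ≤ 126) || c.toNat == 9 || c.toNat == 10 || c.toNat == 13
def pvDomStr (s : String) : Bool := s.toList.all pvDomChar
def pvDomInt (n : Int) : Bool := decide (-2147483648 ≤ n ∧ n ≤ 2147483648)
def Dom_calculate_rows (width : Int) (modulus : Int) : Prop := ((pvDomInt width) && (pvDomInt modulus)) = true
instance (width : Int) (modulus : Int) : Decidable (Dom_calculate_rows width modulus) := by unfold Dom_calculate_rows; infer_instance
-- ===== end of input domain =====

-- B fills the same preallocated array but replaces A's inner 4-term re-summing loop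
-- by one incrementally maintained sliding-window accumulator (constant-factor speedup).


-- ===== PORT A =====
-- body of A's outer loop: inner loop 'for j in range(1,5): if i-j>=0: row_memo[i] += row_memo[i-j]' then 'row_memo[i] %= modulus'
def stepA (modulus : Int) (rm : List Int) (i : Int) : List Int :=
  let rm2 := (PySem.List.pyRange 1 5 1).foldl
    (fun rm j =>
      if i - j ≥ 0 then
        PySem.List.pySetD rm i (PySem.List.pyGetD rm i 0 + PySem.List.pyGetD rm (i - j) 0)
      else rm) rm
  PySem.List.pySetD rm2 i (PySem.Int.mod (PySem.List.pyGetD rm2 i 0) modulus)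

def calculate_rows (width : Int) (modulus : Int) : List Int :=
  -- '[0 for i in range(width+1)]', then 'row_memo[0] = 1', then the outer loop
  (PySem.List.pyRange 1 (width + 1) 1).foldl (stepA modulus)
    (PySem.List.pySetD ((PySem.List.pyRange 0 (width + 1) 1).map (fun _ => (0 : Int))) 0 1)

-- ===== PORT B =====
-- body of B's loop: row_memo[i] = window % modulus; window += row_memo[i]; if i-4 >= 0: window -= row_memo[i-4]
def stepB (modulus : Int) (s : List Int × Int) (i : Int) : List Int × Int :=
  let v := PySem.Int.mod s.2 modulus
  let rm := PySem.List.pySetD s.1 i v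
  let window := s.2 + v
  let window := if i - 4 ≥ 0 then window - PySem.List.pyGetD rm (i - 4) 0 else window
  (rm, window)

def calculate_rows_alt (width : Int) (modulus : Int) : List Int :=
  -- '[0] * (width+1)', then 'row_memo[0] = 1', then the loop with the sliding window
  ((PySem.List.pyRange 1 (width + 1) 1).foldl (stepB modulus)
    (PySem.List.pySetD (List.replicate (width + 1).toNat 0) 0 1, 1)).1

-- ===== PRECONDITION & SPEC =====
-- Pre_ excludes exactly the inputs where both Pythons raise: width < 0 (IndexError on row_memo[0] = 1)
-- and modulus = 0 with width ≥ 1 (ZeroDivisionError on the first '%').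
def Pre_calculate_rows (width : Int) (modulus : Int) : Prop :=
  0 ≤ width ∧ (width = 0 ∨ modulus ≠ 0)
instance (width : Int) (modulus : Int) : Decidable (Pre_calculate_rows width modulus) := by
  unfold Pre_calculate_rows; infer_instance

def pvWitness_calculate_rows : Int × Int := (6, 7)

def Spec_calculate_rows (width : Int) (modulus : Int) (out : List Int) : Prop :=
  out = calculate_rows_alt width modulus
instance (width : Int) (modulus : Int) (out : List Int) : Decidable (Spec_calculate_rows width modulus out) := by
  unfold Spec_calculate_rows; infer_instance

-- ===== CLAIM (what is proved, stated in full; the proofs are below) =====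
def Claim_equal_calculate_rows : Prop := ∀ (width : Int) (modulus : Int), Dom_calculate_rows width modulus → Pre_calculate_rows width modulus → Spec_calculate_rows width modulus (calculate_rows width modulus)

-- ===== LEMMAS AND PROOFS =====

-- gIdx out t = out[t] when 0 ≤ t (default 0), 0 for negative t: the contribution of memo entry t.
def gIdx (out : List Int) (t : Int) : Int := if 0 ≤ t then out.getD t.toNat 0 else 0

-- ghost append-only fold: the filled prefix of B's array together with B's window
def ghostStep (modulus : Int) (s : List Int × Int) (i : Int) : List Int × Int :=
  let v := PySem.Int.mod s.2 modulus
  let out := s.1 ++ [v]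
  let window := s.2 + v
  let window := if i - 4 ≥ 0 then window - PySem.List.pyGetD out (i - 4) 0 else window
  (out, window)

def spine (m : Int) (n : Nat) : List Int × Int :=
  (PySem.List.pyRange 1 ((n : Int) + 1) 1).foldl (ghostStep m) ([1], 1)

lemma mid_get (out : List Int) (acc : Int) (tail : List Int) :
    PySem.List.pyGetD (out ++ acc :: tail) (out.length : Int) 0 = acc := by
  rw [PySem.List.pyGetD_natCast]
  simp

lemma mid_set (out : List Int) (acc : Int) (tail : List Int) (v : Int) :
    PySem.List.pySetD (out ++ acc :: tail) (out.length : Int) v = out ++ v :: tail := by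
  rw [PySem.List.pySetD_natCast]
  simp

lemma gIdx_eq_pyGetD (out : List Int) (rest : List Int) (t : Int) (h0 : 0 ≤ t)
    (hlt : t < (out.length : Int)) :
    PySem.List.pyGetD (out ++ rest) t 0 = gIdx out t := by
  rw [PySem.List.pyGetD_of_nonneg _ _ h0, gIdx, if_pos h0]
  rw [List.getD_append]
  omega

lemma gIdx_append_left (out : List Int) (ys : List Int) (t : Int)
    (hlt : t < (out.length : Int)) : gIdx (out ++ ys) t = gIdx out t := by
  unfold gIdx
  by_cases h0 : 0 ≤ t
  · rw [if_pos h0, if_pos h0, List.getD_append]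
    omega
  · rw [if_neg h0, if_neg h0]

lemma stepA_inner_j (out : List Int) (acc : Int) (tail : List Int) (j : Int)
    (hj : 1 ≤ j) (i : Int) (hi : i = (out.length : Int)) :
    (if i - j ≥ 0 then
        PySem.List.pySetD (out ++ acc :: tail) i
          (PySem.List.pyGetD (out ++ acc :: tail) i 0 +
           PySem.List.pyGetD (out ++ acc :: tail) (i - j) 0)
      else out ++ acc :: tail) = out ++ (acc + gIdx out (i - j)) :: tail := by
  subst hi
  by_cases h : 0 ≤ (out.length : Int) - j
  · rw [if_pos (by omega), mid_get,
      gIdx_eq_pyGetD out (acc :: tail) _ h (by omega), mid_set]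
  · rw [if_neg (by omega), gIdx, if_neg h, add_zero]

-- one outer-loop step of A on a state 'out ++ 0 :: tail' at index i = out.length:
lemma stepA_eq (m : Int) (out tail : List Int) (i : Int) (hi : i = (out.length : Int)) :
    stepA m (out ++ 0 :: tail) i =
      out ++ (PySem.Int.mod (0 + gIdx out (i-1) + gIdx out (i-2) + gIdx out (i-3) + gIdx out (i-4)) m) :: tail := by
  have hr : PySem.List.pyRange 1 5 1 = [1, 2, 3, 4] := by decide
  unfold stepA
  rw [hr]
  simp only [List.foldl_cons, List.foldl_nil]
  rw [stepA_inner_j out 0 tail 1 (by omega) i hi,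
      stepA_inner_j out _ tail 2 (by omega) i hi,
      stepA_inner_j out _ tail 3 (by omega) i hi,
      stepA_inner_j out _ tail 4 (by omega) i hi]
  subst hi
  rw [mid_get, mid_set]

-- joint invariant of A's fold and the ghost spine after n steps
lemma loops_inv (m : Int) (w n : Nat) (hn : n ≤ w) :
    (PySem.List.pyRange 1 ((n : Int) + 1) 1).foldl (stepA m) (1 :: List.replicate w 0)
      = (spine m n).1 ++ List.replicate (w - n) 0
    ∧ (spine m n).1.length = n + 1
    ∧ (spine m n).2
        = gIdx (spine m n).1 (n : Int) + gIdx (spine m n).1 ((n : Int) - 1)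
        + gIdx (spine m n).1 ((n : Int) - 2) + gIdx (spine m n).1 ((n : Int) - 3) := by
  induction n with
  | zero =>
    rw [show (PySem.List.pyRange 1 ((0 : Nat) + 1 : Int) 1) = [] from
      PySem.List.pyRange_one_eq_nil (by omega)]
    refine ⟨by simp [spine, PySem.List.pyRange_one_eq_nil], by simp [spine, PySem.List.pyRange_one_eq_nil], ?_⟩
    simp only [spine]
    rw [show (PySem.List.pyRange 1 ((0 : Nat) + 1 : Int) 1) = [] from
      PySem.List.pyRange_one_eq_nil (by omega)]
    simp only [List.foldl_nil]
    norm_num [gIdx]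
  | succ n ih =>
    have hn' : n ≤ w := by omega
    obtain ⟨ihA, ihL, ihW⟩ := ih hn'
    push_cast
    set out := (spine m n).1 with hout
    set win := (spine m n).2 with hwin
    have hpair : (PySem.List.pyRange 1 ((n : Int) + 1) 1).foldl (ghostStep m) ([1], 1) = (out, win) := rfl
    have hsplit : PySem.List.pyRange 1 ((n : Int) + 1 + 1) 1
        = PySem.List.pyRange 1 ((n : Int) + 1) 1 ++ [(n : Int) + 1] :=
      PySem.List.pyRange_one_succ_right (by omega)
    have hrep : w - n = (w - (n + 1)) + 1 := by omega
    have hspine : spine m (n + 1) = ghostStep m (out, win) ((n : Int) + 1) := by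
      simp only [spine]
      push_cast
      rw [hsplit, List.foldl_append, hpair]
      simp [List.foldl_cons]
    rw [hsplit, List.foldl_append]
    simp only [List.foldl_cons, List.foldl_nil]
    rw [ihA, hrep, List.replicate_succ, hspine]
    have hi : (n : Int) + 1 = (out.length : Int) := by rw [ihL]; push_cast; ring
    rw [stepA_eq m out (List.replicate (w - (n+1)) 0) ((n : Int) + 1) hi]
    set v := PySem.Int.mod win m with hv
    have win_eq : gIdx out ((n:Int) + 1 - 1) + gIdx out ((n:Int) + 1 - 2) + gIdx out ((n:Int) + 1 - 3)
        + gIdx out ((n:Int) + 1 - 4)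
        = gIdx out (n:Int) + gIdx out ((n:Int) - 1) + gIdx out ((n:Int) - 2) + gIdx out ((n:Int) - 3) := by
      rw [show ((n:Int) + 1 - 1) = (n:Int) by ring, show ((n:Int) + 1 - 2) = (n:Int) - 1 by ring,
          show ((n:Int) + 1 - 3) = (n:Int) - 2 by ring, show ((n:Int) + 1 - 4) = (n:Int) - 3 by ring]
    refine ⟨?_, ?_, ?_⟩
    · -- lists agree
      simp only [ghostStep, ← hv]
      rw [zero_add, win_eq, ← ihW, ← hv]
      simp
    · -- length
      simp only [ghostStep]
      simp [ihL]
    · -- window invariant at n+1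
      simp only [ghostStep, ← hv]
      have hlen : (out.length : Int) = (n : Int) + 1 := by rw [ihL]; push_cast; ring
      have g_new : gIdx (out ++ [v]) ((n : Int) + 1) = v := by
        rw [gIdx, if_pos (by omega)]
        have h1 : ((n : Int) + 1).toNat = out.length := by omega
        rw [h1]
        simp
      have g_old : ∀ t : Int, t ≤ (n : Int) → gIdx (out ++ [v]) t = gIdx out t := by
        intro t ht
        exact gIdx_append_left out [v] t (by omega)
      by_cases h4 : (n : Int) + 1 - 4 ≥ 0
      · rw [if_pos h4]
        have hg : PySem.List.pyGetD (out ++ [v]) ((n : Int) + 1 - 4) 0 = gIdx out ((n:Int) + 1 - 4) :=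
          gIdx_eq_pyGetD out [v] _ (by omega) (by omega)
        rw [hg, g_new, g_old _ (by omega), g_old _ (by omega), g_old _ (by omega), ihW]
        have h14 : (n:Int) + 1 - 4 = (n:Int) - 3 := by ring
        rw [h14]
        ring_nf
      · rw [if_neg h4]
        rw [g_new, g_old _ (by omega), g_old _ (by omega), g_old _ (by omega), ihW]
        have h3 : gIdx out ((n:Int) - 3) = 0 := by rw [gIdx, if_neg (by omega)]
        rw [h3]
        ring_nf

-- B's in-place fold carries exactly the spine's prefix, padded with the unfilled zeros
lemma foldB_eq_spine (m : Int) (w n : Nat) (hn : n ≤ w) :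
    (PySem.List.pyRange 1 ((n : Int) + 1) 1).foldl (stepB m) (1 :: List.replicate w 0, 1)
      = ((spine m n).1 ++ List.replicate (w - n) 0, (spine m n).2) := by
  induction n with
  | zero =>
    rw [show (PySem.List.pyRange 1 ((0 : Nat) + 1 : Int) 1) = [] from
      PySem.List.pyRange_one_eq_nil (by omega)]
    simp only [spine]
    rw [show (PySem.List.pyRange 1 ((0 : Nat) + 1 : Int) 1) = [] from
      PySem.List.pyRange_one_eq_nil (by omega)]
    simp
  | succ n ih =>
    have hn' : n ≤ w := by omega
    obtain ⟨-, ihL, -⟩ := loops_inv m w n hn'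
    push_cast
    have hsplit : PySem.List.pyRange 1 ((n : Int) + 1 + 1) 1
        = PySem.List.pyRange 1 ((n : Int) + 1) 1 ++ [(n : Int) + 1] :=
      PySem.List.pyRange_one_succ_right (by omega)
    have hspine : spine m (n + 1) = ghostStep m (spine m n) ((n : Int) + 1) := by
      simp only [spine]
      push_cast
      rw [hsplit, List.foldl_append]
      simp [List.foldl_cons]
    rw [hsplit, List.foldl_append, ih hn']
    simp only [List.foldl_cons, List.foldl_nil]
    set out := (spine m n).1 with hout
    set win := (spine m n).2 with hwin
    have hrep : w - n = (w - (n + 1)) + 1 := by omega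
    have hi : (n : Int) + 1 = (out.length : Int) := by rw [ihL]; push_cast; ring
    have hv : PySem.Int.mod win m = PySem.Int.mod win m := rfl
    simp only [stepB, hspine, ghostStep]
    set v := PySem.Int.mod win m
    have hset : PySem.List.pySetD (out ++ List.replicate (w - n) 0) ((n : Int) + 1) v
        = out ++ v :: List.replicate (w - (n + 1)) 0 := by
      rw [hrep, List.replicate_succ, hi, mid_set]
    rw [hset]
    have hcons : out ++ v :: List.replicate (w - (n + 1)) 0
        = (out ++ [v]) ++ List.replicate (w - (n + 1)) 0 := by simp
    by_cases h4 : (n : Int) + 1 - 4 ≥ 0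
    · rw [if_pos h4, if_pos h4]
      have hg1 : PySem.List.pyGetD (out ++ v :: List.replicate (w - (n+1)) 0) ((n : Int) + 1 - 4) 0
          = gIdx out ((n:Int) + 1 - 4) :=
        gIdx_eq_pyGetD out _ _ (by omega) (by omega)
      have hg2 : PySem.List.pyGetD (out ++ [v]) ((n : Int) + 1 - 4) 0
          = gIdx out ((n:Int) + 1 - 4) :=
        gIdx_eq_pyGetD out _ _ (by omega) (by omega)
      rw [hg1, hg2, hcons]
    · rw [if_neg h4, if_neg h4, hcons]

-- both initial lists are 1 :: replicate w 0
lemma initA_eq (w : Nat) :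
    PySem.List.pySetD ((PySem.List.pyRange 0 ((w : Int) + 1) 1).map (fun _ => (0 : Int))) 0 1
      = 1 :: List.replicate w 0 := by
  have h1 : (PySem.List.pyRange 0 ((w : Int) + 1) 1).map (fun _ => (0 : Int))
      = List.replicate (w + 1) 0 := by
    rw [List.map_const']
    congr 1
    rw [PySem.List.length_pyRange_one]
    omega
  rw [h1, PySem.List.pySetD_of_nonneg _ _ (by omega)]
  rw [List.replicate_succ]
  simp

lemma initB_eq (w : Nat) :
    PySem.List.pySetD (List.replicate ((w : Int) + 1).toNat (0 : Int)) 0 1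
      = 1 :: List.replicate w 0 := by
  have h1 : ((w : Int) + 1).toNat = w + 1 := by omega
  rw [h1, PySem.List.pySetD_of_nonneg _ _ (by omega), List.replicate_succ]
  simp

-- ===== VERDICT (by name: the statement is the Claim_ definition above) =====
theorem calculate_rows_spec : Claim_equal_calculate_rows := by
  intro width modulus _ hpre
  obtain ⟨hw, _⟩ := hpre
  unfold Spec_calculate_rows calculate_rows calculate_rows_alt
  obtain ⟨w, rfl⟩ : ∃ w : Nat, width = (w : Int) := ⟨width.toNat, by omega⟩
  rw [initA_eq w, initB_eq w]
  obtain ⟨hA, -, -⟩ := loops_inv modulus w w le_rfl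
  rw [hA, foldB_eq_spine modulus w w le_rfl]
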